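-- pv_equiv track=rewrite | github.com/cassanof/finetuning-harness | dataset_loader.py | apply_mask_till_token_id
-- ===== SOURCE A (Python) =====
-- from typing import List
--
-- def apply_mask_till_token_id(
--         token_ids: List[int],
--         mask_till_token_id: int,
--         concat_token_id: int,
--         pad_token_id: int,
--         mask=-100,
-- ):
--     # notes:
--     #   - stop condition: we reach the end of the sequence or we find pad_token_id and evey token after it is pad_token_id
--     #   - concat_token_id delimiates examples. we need to start re-masking from this token_id
--     #   - mask_till_token_id is the token that dictates the end of the masking (we also mask this token)
--
--     masked = []
--     masking = True
--     masking_off_forever = False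
--     for i, token in enumerate(token_ids):
--         if token == pad_token_id and all([t == pad_token_id or t == concat_token_id for t in token_ids[i:]]):
--             masking_off_forever = True
--
--         if token == mask_till_token_id:
--             masking = False
--         else:  # do not add if mask token
--             if masking and not masking_off_forever:
--                 masked.append(mask)
--             else:
--                 masked.append(token)
--
--         if token == concat_token_id:
--             masking = True
--
--     return masked
-- ===== SOURCE B (Python) =====
-- def apply_mask_till_token_id(
--         token_ids,
--         mask_till_token_id,
--         concat_token_id,
--         pad_token_id,
--         mask=-100,
-- ):
--     # Precompute, in one backward pass, suffix_ok[i] = "every token from i on is pad or concat",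
--     # so the forward pass never rescans the suffix.
--     n = len(token_ids)
--     suffix_ok = [True] * (n + 1)
--     for i in range(n - 1, -1, -1):
--         t = token_ids[i]
--         suffix_ok[i] = (t == pad_token_id or t == concat_token_id) and suffix_ok[i + 1]
--
--     masked = []
--     masking = True
--     off = False
--     for i, token in enumerate(token_ids):
--         if token == pad_token_id and suffix_ok[i]:
--             off = True
--         if token != mask_till_token_id:
--             masked.append(mask if masking and not off else token)
--         masking = True if token == concat_token_id else (False if token == mask_till_token_id else masking)
--     return masked
-- ===== Notes on version B (the rewrite author's own statement) =====
-- stated objective: alternative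
-- what changed: The per-pad-token rescan of the remaining suffix (all(token_ids[i:])) is replaced by one backward pass precomputing suffix 'all pad/concat' flags, followed by a single forward masking pass with O(1) work per token.
import Mathlib
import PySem

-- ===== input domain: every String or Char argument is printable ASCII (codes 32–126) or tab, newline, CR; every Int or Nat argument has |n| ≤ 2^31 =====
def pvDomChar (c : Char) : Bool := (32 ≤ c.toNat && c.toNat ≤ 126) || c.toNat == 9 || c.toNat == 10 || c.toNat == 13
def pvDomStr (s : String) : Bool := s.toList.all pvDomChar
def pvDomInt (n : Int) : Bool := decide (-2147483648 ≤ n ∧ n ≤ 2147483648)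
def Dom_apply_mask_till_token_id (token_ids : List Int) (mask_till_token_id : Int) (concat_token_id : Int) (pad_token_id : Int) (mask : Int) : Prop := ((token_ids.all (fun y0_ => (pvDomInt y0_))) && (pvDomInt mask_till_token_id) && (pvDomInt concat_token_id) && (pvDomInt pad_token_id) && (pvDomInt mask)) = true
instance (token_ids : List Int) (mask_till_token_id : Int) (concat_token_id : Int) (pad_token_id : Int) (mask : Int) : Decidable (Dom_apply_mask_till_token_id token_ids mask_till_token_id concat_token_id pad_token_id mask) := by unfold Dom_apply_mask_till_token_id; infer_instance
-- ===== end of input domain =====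

-- B precomputes suffix all-pad/concat flags in one backward pass instead of rescanning the suffix at each pad token (alternative two-pass structure; not measurably faster on typical inputs).


-- ===== PORT A =====
-- A's loop as structural recursion: at index i the remaining list IS token_ids[i:],
-- so the `all([...])` over the slice is the `.all` over the current suffix.
def goA (mask_till_token_id concat_token_id pad_token_id mask : Int)
    (rem : List Int) (masking masking_off_forever : Bool) : List Int :=
  match rem with
  | [] => []
  | token :: rest =>
    let off := if token == pad_token_id &&
        ((token :: rest).all (fun t => t == pad_token_id || t == concat_token_id))
      then true else masking_off_forever
    let head : List Int :=
      if token == mask_till_token_id then []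
      else [if masking && !off then mask else token]
    let masking' := if token == concat_token_id then true
      else (if token == mask_till_token_id then false else masking)
    head ++ goA mask_till_token_id concat_token_id pad_token_id mask rest masking' off

def apply_mask_till_token_id (token_ids : List Int) (mask_till_token_id : Int) (concat_token_id : Int) (pad_token_id : Int) (mask : Int) : List Int :=
  goA mask_till_token_id concat_token_id pad_token_id mask token_ids true false

-- ===== PORT B =====
-- B's backward pass: sufFlags xs ! i = "every token from i on is pad or concat" (sentinel true at the end).
def sufFlags (concat_token_id pad_token_id : Int) : List Int → List Bool
  | [] => []
  | t :: rest =>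
    let r := sufFlags concat_token_id pad_token_id rest
    (((t == pad_token_id) || (t == concat_token_id)) && r.headD true) :: r

-- B's forward pass over tokens paired with their precomputed suffix flags.
def goB (mask_till_token_id concat_token_id pad_token_id mask : Int)
    (pairs : List (Int × Bool)) (masking off : Bool) : List Int :=
  match pairs with
  | [] => []
  | (token, sfx) :: rest =>
    let off' := if token == pad_token_id && sfx then true else off
    let head : List Int :=
      if token != mask_till_token_id then [if masking && !off' then mask else token] else []
    let masking' := if token == concat_token_id then true
      else (if token == mask_till_token_id then false else masking)
    head ++ goB mask_till_token_id concat_token_id pad_token_id mask rest masking' off'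

def apply_mask_till_token_id_alt (token_ids : List Int) (mask_till_token_id : Int) (concat_token_id : Int) (pad_token_id : Int) (mask : Int) : List Int :=
  goB mask_till_token_id concat_token_id pad_token_id mask
    (token_ids.zip (sufFlags concat_token_id pad_token_id token_ids)) true false

-- ===== PRECONDITION & SPEC =====
def Spec_apply_mask_till_token_id (token_ids : List Int) (mask_till_token_id : Int) (concat_token_id : Int) (pad_token_id : Int) (mask : Int) (out : List Int) : Prop := out = apply_mask_till_token_id_alt token_ids mask_till_token_id concat_token_id pad_token_id mask
instance (token_ids : List Int) (mask_till_token_id : Int) (concat_token_id : Int) (pad_token_id : Int) (mask : Int) (out : List Int) : Decidable (Spec_apply_mask_till_token_id token_ids mask_till_token_id concat_token_id pad_token_id mask out) := by unfold Spec_apply_mask_till_token_id; infer_instance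

-- ===== CLAIM (what is proved, stated in full; the proofs are below) =====
def Claim_equal_apply_mask_till_token_id : Prop := ∀ (token_ids : List Int) (mask_till_token_id : Int) (concat_token_id : Int) (pad_token_id : Int) (mask : Int), Dom_apply_mask_till_token_id token_ids mask_till_token_id concat_token_id pad_token_id mask → Spec_apply_mask_till_token_id token_ids mask_till_token_id concat_token_id pad_token_id mask (apply_mask_till_token_id token_ids mask_till_token_id concat_token_id pad_token_id mask)

-- ===== LEMMAS AND PROOFS =====

theorem sufFlags_headD (c p : Int) (xs : List Int) :
    (sufFlags c p xs).headD true = xs.all (fun t => t == p || t == c) := by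
  induction xs with
  | nil => rfl
  | cons t rest ih => simp only [sufFlags, List.all_cons, List.headD_cons, ih]

theorem goA_eq_goB (m c p mask : Int) (xs : List Int) (masking off : Bool) :
    goA m c p mask xs masking off =
      goB m c p mask (xs.zip (sufFlags c p xs)) masking off := by
  induction xs generalizing masking off with
  | nil => rfl
  | cons t rest ih =>
    simp only [goA, goB, sufFlags, List.zip_cons_cons, sufFlags_headD, List.all_cons, bne]
    rw [ih]
    by_cases h : t = m <;> simp [h]

-- ===== VERDICT (by name: the statement is the Claim_ definition above) =====
theorem apply_mask_till_token_id_spec : Claim_equal_apply_mask_till_token_id := by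
  intro token_ids m c p mask _
  unfold Spec_apply_mask_till_token_id apply_mask_till_token_id apply_mask_till_token_id_alt
  exact goA_eq_goB m c p mask token_ids true false
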